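-- pv_equiv track=rewrite | github.com/dauletkali/algo | give-a-check.py | checkDownLeft
-- ===== SOURCE A (Python) =====
-- def checkDownLeft(row,col,board,color):
-- 	figures = ""
-- 	if color == "white": figures = "qb"
-- 	else: figures = "QB"
-- 	if row == 7 or col == 0:
-- 		if board[row][col] in figures:
-- 			return True
-- 	else:
-- 		if board[row][col] == "#":
-- 			return checkDownLeft(row+1,col-1,board,color)
-- 		if board[row][col] in figures:
-- 			return True
-- 	return False
-- ===== SOURCE B (Python) =====
-- def checkDownLeft(row, col, board, color):
--     figures = "qb" if color == "white" else "QB"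
--     # advance past empty ('#') squares while not on the boundary, then test once
--     while row != 7 and col != 0 and board[row][col] == "#":
--         row += 1
--         col -= 1
--     return board[row][col] in figures
-- ===== Notes on version B (the rewrite author's own statement) =====
-- stated objective: simpler
-- what changed: The recursion with duplicated membership returns is replaced by a scan-then-test decomposition: a while loop first advances (row,col) past '#' squares up to the boundary or the first occupied square, then a single membership test on that stop square decides the result.
import Mathlib
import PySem

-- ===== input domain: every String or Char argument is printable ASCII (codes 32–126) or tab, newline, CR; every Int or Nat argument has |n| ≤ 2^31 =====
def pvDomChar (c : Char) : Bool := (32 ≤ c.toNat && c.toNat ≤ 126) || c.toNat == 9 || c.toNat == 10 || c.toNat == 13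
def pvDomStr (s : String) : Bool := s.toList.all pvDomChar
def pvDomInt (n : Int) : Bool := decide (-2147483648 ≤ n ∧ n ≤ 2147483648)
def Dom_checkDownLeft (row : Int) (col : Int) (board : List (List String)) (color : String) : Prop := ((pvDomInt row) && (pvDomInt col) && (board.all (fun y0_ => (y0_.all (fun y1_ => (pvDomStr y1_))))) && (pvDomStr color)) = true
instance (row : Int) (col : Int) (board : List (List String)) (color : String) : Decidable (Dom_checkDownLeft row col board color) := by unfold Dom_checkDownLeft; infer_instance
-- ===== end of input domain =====

-- B replaces A's recursion (with its duplicated membership returns) by a scan-then-test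
-- decomposition: first find the stop square of the diagonal walk, then test it once;
-- return value only.

-- Cell lookup with Python's index semantics (negative wrap; none = IndexError),
-- shared by both ports.
def pvCell? (board : List (List String)) (r c : Int) : Option String :=
  (PySem.List.pyGet? board r).bind (fun l => PySem.List.pyGet? l c)

-- ===== PORT A =====
-- A is recursive; the port recurses on a fuel counter large enough for every walk
-- admitted by Pre_checkDownLeft (the walk makes fewer than 2*|board|+16 calls there);
-- a cell read that would raise IndexError in Python is outside Pre_ and returns false here.
def checkDownLeftGoA (fuel : Nat) (row : Int) (col : Int) (board : List (List String)) (color : String) : Bool :=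
  let figures : String := if color == "white" then "qb" else "QB"
  match pvCell? board row col with
  | none => false
  | some cell =>
    if row == 7 || col == 0 then
      if PySem.Str.isIn cell figures then true else false
    else
      if cell == "#" then
        match fuel with
        | 0 => false
        | f + 1 => checkDownLeftGoA f (row + 1) (col - 1) board color
      else
        if PySem.Str.isIn cell figures then true else false

def checkDownLeft (row : Int) (col : Int) (board : List (List String)) (color : String) : Bool :=
  checkDownLeftGoA (2 * board.length + 17) row col board color

-- ===== PORT B =====
-- Stage 1 of Source B: the while loop. It returns the final value of (row, col) — the
-- stop square — as fuel-counted iteration; none = the loop's cell read raised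
-- IndexError (outside Pre_) or fuel ran out (never inside Pre_).
def pvFindStopB (fuel : Nat) (row : Int) (col : Int) (board : List (List String)) : Option (Int × Int) :=
  match fuel with
  | 0 => none
  | f + 1 =>
    if row == 7 || col == 0 then some (row, col)
    else
      match pvCell? board row col with
      | none => none
      | some cell => if cell == "#" then pvFindStopB f (row + 1) (col - 1) board else some (row, col)

-- Stage 2 of Source B: the single membership test on the stop square ('in figures');
-- a failed read there is an IndexError (outside Pre_), rendered as false.
def pvTestStopB (board : List (List String)) (figures : String) : Option (Int × Int) → Bool
  | none => false
  | some (r, c) =>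
    match pvCell? board r c with
    | none => false
    | some cell => PySem.Str.isIn cell figures

def checkDownLeft_alt (row : Int) (col : Int) (board : List (List String)) (color : String) : Bool :=
  pvTestStopB board (if color == "white" then "qb" else "QB")
    (pvFindStopB (2 * board.length + 18) row col board)

-- ===== PRECONDITION & SPEC =====
-- The walk leaves square k of the diagonal iff it is not a boundary square and holds "#".
def pvStop (board : List (List String)) (row col : Int) (k : Nat) : Bool :=
  (row + k == 7) || (col - k == 0) || (pvCell? board (row + k) (col - k) != some "#")

-- Pre_ excludes exactly the inputs on which A raises: the starting square and every
-- further square of the initial down-left run of "#" squares (up to the square where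
-- the walk stops: row 7, column 0, or a non-"#" square) must be valid Python indices
-- into the board (negative in-range indices wrap, as in Python). If the run never
-- stops, validity must fail within 2*|board|+16 steps, so A raises there too.
def Pre_checkDownLeft (row : Int) (col : Int) (board : List (List String)) (color : String) : Prop :=
  (pvCell? board row col).isSome ∧
  ∀ k ∈ Finset.range (2 * board.length + 16),
    (∀ j ∈ Finset.range (k + 1), pvStop board row col j = false) →
    (pvCell? board (row + k + 1) (col - k - 1)).isSome

instance (row : Int) (col : Int) (board : List (List String)) (color : String) : Decidable (Pre_checkDownLeft row col board color) := by unfold Pre_checkDownLeft; infer_instance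

def pvWitness_checkDownLeft : Int × Int × List (List String) × String :=
  (6, 1, [["#","#"],["#","#"],["#","#"],["#","#"],["#","#"],["#","#"],["#","#"],["q","#"]], "white")

def Spec_checkDownLeft (row : Int) (col : Int) (board : List (List String)) (color : String) (out : Bool) : Prop := out = checkDownLeft_alt row col board color
instance (row : Int) (col : Int) (board : List (List String)) (color : String) (out : Bool) : Decidable (Spec_checkDownLeft row col board color out) := by unfold Spec_checkDownLeft; infer_instance

-- ===== CLAIM (what is proved, stated in full; the proofs are below) =====
def Claim_equal_checkDownLeft : Prop := ∀ (row : Int) (col : Int) (board : List (List String)) (color : String), Dom_checkDownLeft row col board color → Pre_checkDownLeft row col board color → Spec_checkDownLeft row col board color (checkDownLeft row col board color)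

-- ===== LEMMAS AND PROOFS =====

-- The fueled recursion of port A equals port B's find-then-test with one more unit of
-- fuel, on ALL inputs (Pre_ is not needed for the equality of the ports, only for
-- their faithfulness to the Python programs).
theorem goA_eq_findTestB (f : Nat) (row col : Int) (board : List (List String)) (color : String) :
    checkDownLeftGoA f row col board color
      = pvTestStopB board (if color == "white" then "qb" else "QB")
          (pvFindStopB (f + 1) row col board) := by
  induction f generalizing row col with
  | zero =>
    simp only [checkDownLeftGoA, pvFindStopB]
    rcases h : pvCell? board row col with _ | cell
    · by_cases hb : (row == 7 || col == 0) = true <;> simp [hb, pvTestStopB, h]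
    · by_cases hb : (row == 7 || col == 0) = true <;>
        by_cases hc : (cell == "#") = true <;>
          simp [hb, hc, h, pvTestStopB, pvFindStopB]
  | succ f ih =>
    simp only [checkDownLeftGoA, pvFindStopB]
    rcases h : pvCell? board row col with _ | cell
    · by_cases hb : (row == 7 || col == 0) = true <;> simp [hb, pvTestStopB, h]
    · by_cases hb : (row == 7 || col == 0) = true <;>
        by_cases hc : (cell == "#") = true <;>
          simp [hb, hc, h, pvTestStopB, ih, pvFindStopB]

-- ===== VERDICT (by name: the statement is the Claim_ definition above) =====
theorem checkDownLeft_spec : Claim_equal_checkDownLeft := by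
  intro row col board color _ _
  unfold Spec_checkDownLeft checkDownLeft checkDownLeft_alt
  exact goA_eq_findTestB (2 * board.length + 17) row col board color
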